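-- pv_equiv track=rewrite | github.com/Frsxk/deeTheP-0 | Week 3/Lab3.py | seperate_coordinates
-- ===== SOURCE A (Python) =====
-- def seperate_coordinates(string):
--     # Fungsi untuk memisahkan dua string koordinat
--     # Contoh eksekusi: 13 -> [1, 3], 5-5 -> [5, -5] dst.
--     result = []
--     current = string[0]
--
--     # Cek apakah string tidak mengandung -
--     if len(string) == 2 and current != '-':
--         return [string[0], string[1]]
--
--     # Logika untuk memisah string
--     for character in string[1:]:
--         if character == '-' and current != '':
--             result.append(current)
--             current = character
--         else:
--             if current == '-':
--                 current += character
--             else: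
--                 result.append(current)
--                 current = character
--
--     if current:
--         result.append(current)
--     return result
-- ===== SOURCE B (Python) =====
-- def seperate_coordinates(string):
--     # Single-pass lookahead tokenizer: a '-' followed by a non-dash char
--     # makes a two-char token; every other char is its own token.
--     tokens = []
--     i = 0
--     n = len(string)
--     while i < n:
--         if string[i] == '-' and i + 1 < n and string[i + 1] != '-':
--             tokens.append(string[i:i + 2])
--             i += 2
--         else:
--             tokens.append(string[i])
--             i += 1
--     return tokens
-- ===== Notes on version B (the rewrite author's own statement) =====
-- stated objective: simpler
-- what changed: B is a single-pass lookahead tokenizer (a '-' followed by a non-dash char is one two-char token, everything else a one-char token), replacing A's pending-token state machine and its redundant len==2 shortcut.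
import Mathlib
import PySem

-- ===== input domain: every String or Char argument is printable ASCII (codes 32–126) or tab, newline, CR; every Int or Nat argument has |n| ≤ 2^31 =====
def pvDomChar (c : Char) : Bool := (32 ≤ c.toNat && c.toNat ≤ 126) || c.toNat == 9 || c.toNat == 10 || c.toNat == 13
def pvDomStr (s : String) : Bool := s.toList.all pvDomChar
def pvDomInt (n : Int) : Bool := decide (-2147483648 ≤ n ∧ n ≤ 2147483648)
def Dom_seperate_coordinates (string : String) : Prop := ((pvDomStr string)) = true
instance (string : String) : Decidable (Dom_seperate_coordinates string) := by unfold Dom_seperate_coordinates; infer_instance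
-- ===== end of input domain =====

-- B replaces A's pending-token state machine (and its len==2 shortcut) by a
-- single-pass lookahead tokenizer; objective: simpler. A raises IndexError on "",
-- which Pre_ excludes (B returns [] there).

-- ===== PORT A =====
-- A's loop: state = (result so far, pending token)
def pvLoopA : List Char → List (List Char) → List Char → List (List Char)
  | [], res, cur => if cur ≠ [] then res ++ [cur] else res
  | ch :: rest, res, cur =>
    if ch = '-' ∧ cur ≠ [] then pvLoopA rest (res ++ [cur]) ['-']
    else if cur = ['-'] then pvLoopA rest res (cur ++ [ch])
    else pvLoopA rest (res ++ [cur]) [ch]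

def seperate_coordinates (string : String) : List String :=
  match string.toList with
  | [] => []                       -- string[0] raises IndexError: outside Pre_
  | [c0, c1] =>                    -- the len(string) == 2 shortcut
      if c0 ≠ '-' then [String.ofList [c0], String.ofList [c1]]
      else (pvLoopA [c1] [] [c0]).map String.ofList
  | c0 :: rest => (pvLoopA rest [] [c0]).map String.ofList

-- ===== PORT B =====
-- B's while loop with one-char lookahead, as structural recursion
def pvTokB : List Char → List String
  | [] => []
  | [c] => [String.ofList [c]]
  | c :: c2 :: rest =>
    if c = '-' ∧ c2 ≠ '-' then String.ofList [c, c2] :: pvTokB rest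
    else String.ofList [c] :: pvTokB (c2 :: rest)

def seperate_coordinates_alt (string : String) : List String :=
  pvTokB string.toList

-- ===== PRECONDITION & SPEC =====
-- Pre_ excludes only the empty string, on which A raises IndexError (B returns []).
def Pre_seperate_coordinates (string : String) : Prop := string ≠ ""
instance (string : String) : Decidable (Pre_seperate_coordinates string) := by unfold Pre_seperate_coordinates; infer_instance
def pvWitness_seperate_coordinates : String := "5-5"

def Spec_seperate_coordinates (string : String) (out : List String) : Prop := out = seperate_coordinates_alt string
instance (string : String) (out : List String) : Decidable (Spec_seperate_coordinates string out) := by unfold Spec_seperate_coordinates; infer_instance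

-- ===== CLAIM (what is proved, stated in full; the proofs are below) =====
def Claim_equal_seperate_coordinates : Prop := ∀ (string : String), Dom_seperate_coordinates string → Pre_seperate_coordinates string → Spec_seperate_coordinates string (seperate_coordinates string)

-- ===== LEMMAS AND PROOFS =====

lemma pvTokB_cons_ne (c : Char) (rest : List Char) (h : c ≠ '-') :
    pvTokB (c :: rest) = String.ofList [c] :: pvTokB rest := by
  cases rest with
  | nil => simp [pvTokB]
  | cons c2 r => simp [pvTokB, h]

lemma pvLoopA_spec (t : List Char) :
    ∀ res : List (List Char),
      ((pvLoopA t res ['-']).map String.ofList = res.map String.ofList ++ pvTokB ('-' :: t))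
      ∧ (∀ cur : List Char, cur ≠ [] → cur ≠ ['-'] →
          (pvLoopA t res cur).map String.ofList = res.map String.ofList ++ String.ofList cur :: pvTokB t) := by
  induction t with
  | nil =>
    intro res
    constructor
    · simp [pvLoopA, pvTokB]
    · intro cur h1 _; simp [pvLoopA, pvTokB, h1]
  | cons c rest ih =>
    intro res
    constructor
    · by_cases hc : c = '-'
      · subst hc
        have : pvLoopA ('-' :: rest) res ['-'] = pvLoopA rest (res ++ [['-']]) ['-'] := by
          simp [pvLoopA]
        rw [this, (ih (res ++ [['-']])).1]
        simp [pvTokB]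
      · have : pvLoopA (c :: rest) res ['-'] = pvLoopA rest res ['-', c] := by
          simp [pvLoopA, hc]
        rw [this, (ih res).2 ['-', c] (by simp) (by simp)]
        simp [pvTokB, hc]
    · intro cur h1 h2
      by_cases hc : c = '-'
      · subst hc
        have : pvLoopA ('-' :: rest) res cur = pvLoopA rest (res ++ [cur]) ['-'] := by
          simp [pvLoopA, h1]
        rw [this, (ih (res ++ [cur])).1]
        simp
      · have : pvLoopA (c :: rest) res cur = pvLoopA rest (res ++ [cur]) [c] := by
          simp [pvLoopA, hc, h2]
        rw [this, (ih (res ++ [cur])).2 [c] (by simp) (by simp [hc])]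
        simp [pvTokB_cons_ne c rest hc]

-- ===== VERDICT (by name: the statement is the Claim_ definition above) =====
theorem seperate_coordinates_spec : Claim_equal_seperate_coordinates := by
  intro string _ hpre
  unfold Spec_seperate_coordinates seperate_coordinates seperate_coordinates_alt
  have hne : string.toList ≠ [] := fun h => hpre (String.toList_eq_nil_iff.mp h)
  cases hcs : string.toList with
  | nil => exact absurd hcs hne
  | cons c0 rest =>
    cases rest with
    | nil =>
      by_cases hc : c0 = '-'
      · subst hc
        simp [(pvLoopA_spec [] []).1, pvTokB]
      · simp [(pvLoopA_spec [] []).2 [c0] (by simp) (by simp [hc]), pvTokB]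
    | cons c1 rest2 =>
      cases rest2 with
      | nil =>
        by_cases hc : c0 = '-'
        · subst hc
          simp [(pvLoopA_spec [c1] []).1]
        · simp [hc, pvTokB]
      | cons c2 rest3 =>
        by_cases hc : c0 = '-'
        · subst hc
          simp [(pvLoopA_spec (c1 :: c2 :: rest3) []).1]
        · simp [(pvLoopA_spec (c1 :: c2 :: rest3) []).2 [c0] (by simp) (by simp [hc]),
                pvTokB_cons_ne c0 _ hc]
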